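-- pv_equiv track=rewrite | github.com/Jimdewit/AoC | advent 2019/challenge 04/number04.py | check_candidates_again
-- ===== SOURCE A (Python) =====
-- from collections import Counter
--
-- def check_candidates_again(candidates):
--     filtered_candidates = []
--     for number in candidates:
--         number_check = Counter(y for y in str(number)).values()
--         if max(number_check) > 2 and not 2 in number_check:
--             continue
--         elif 2 in number_check:
--             filtered_candidates += [number]
--     return filtered_candidates
-- ===== SOURCE B (Python) =====
-- from itertools import groupby
--
-- def check_candidates_again(candidates):
--     filtered_candidates = []
--     for number in candidates:
--         digits = sorted(str(number))
--         if any(len(list(g)) == 2 for _, g in groupby(digits)):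
--             filtered_candidates.append(number)
--     return filtered_candidates
-- ===== Notes on version B (the rewrite author's own statement) =====
-- stated objective: idiomatic
-- what changed: Replaces the Counter frequency dict (and the redundant max>2 branch) with sorting each number's digits and scanning equal-digit runs via itertools.groupby, keeping the number iff some run has length exactly 2.
import Mathlib
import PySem

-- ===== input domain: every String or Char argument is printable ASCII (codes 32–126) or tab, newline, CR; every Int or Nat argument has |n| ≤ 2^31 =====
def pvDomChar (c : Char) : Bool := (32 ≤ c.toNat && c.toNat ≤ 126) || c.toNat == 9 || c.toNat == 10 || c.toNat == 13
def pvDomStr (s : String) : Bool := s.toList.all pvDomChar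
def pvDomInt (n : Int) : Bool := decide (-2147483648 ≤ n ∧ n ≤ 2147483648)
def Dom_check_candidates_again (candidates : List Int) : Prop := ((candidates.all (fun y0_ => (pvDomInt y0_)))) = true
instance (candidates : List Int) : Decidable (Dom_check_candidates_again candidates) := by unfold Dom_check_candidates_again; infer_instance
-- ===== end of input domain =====

-- B replaces A's Counter frequency dict (and its redundant max>2 branch) by sorting each
-- number's digits and scanning equal-digit runs (groupby), keeping the number iff some run
-- has length exactly 2; same return value, no speed claim.

-- ===== PORT A =====
def check_candidates_again (candidates : List Int) : List Int :=
  candidates.foldl (fun filtered_candidates number =>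
    -- number_check = Counter(y for y in str(number)).values()
    let number_check := (PySem.Dict.counter (PySem.Int.toChars number)).values
    -- max(number_check): number_check is never empty (str(number) has at least one char),
    -- so max? is always some; .getD 0 only totalizes the unreachable empty case.
    if (PySem.List.max? number_check (fun x => x)).getD 0 > 2 ∧ ¬ ((2 : Int) ∈ number_check) then
      filtered_candidates
    else if (2 : Int) ∈ number_check then
      filtered_candidates ++ [number]
    else
      filtered_candidates) []

-- ===== PORT B =====
-- any(len(list(g)) == 2 for _, g in groupby(digits)) on a sorted char list:
-- peel each maximal run of the leading char, succeed iff some run has length 2.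
def pvHasRun2 : List Char → Bool
  | [] => false
  | c :: rest =>
    if (rest.takeWhile (· == c)).length + 1 == 2 then true
    else pvHasRun2 (rest.dropWhile (· == c))
termination_by s => s.length
decreasing_by
  exact Nat.lt_succ_of_le (List.length_dropWhile_le _ _)

def check_candidates_again_alt (candidates : List Int) : List Int :=
  candidates.foldl (fun filtered_candidates number =>
    let digits := PySem.List.sorted (PySem.Int.toChars number) (fun c => c) false
    if pvHasRun2 digits then filtered_candidates ++ [number] else filtered_candidates) []

-- ===== PRECONDITION & SPEC =====
def Spec_check_candidates_again (candidates : List Int) (out : List Int) : Prop := out = check_candidates_again_alt candidates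
instance (candidates : List Int) (out : List Int) : Decidable (Spec_check_candidates_again candidates out) := by unfold Spec_check_candidates_again; infer_instance

-- ===== CLAIM (what is proved, stated in full; the proofs are below) =====
def Claim_equal_check_candidates_again : Prop := ∀ (candidates : List Int), Dom_check_candidates_again candidates → Spec_check_candidates_again candidates (check_candidates_again candidates)

-- ===== LEMMAS AND PROOFS =====

-- head of dropWhile fails the predicate
lemma pv_dropWhile_head_false {p : Char → Bool} {l : List Char} {d : Char} {t : List Char}
    (h : l.dropWhile p = d :: t) : p d = false := by
  induction l with
  | nil => simp at h
  | cons a l ih =>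
    rw [List.dropWhile_cons] at h
    by_cases hp : p a
    · simp only [hp, if_true] at h; exact ih h
    · simp only [hp] at h
      cases h
      simpa using hp

-- every element of dropWhile (== c) of a (≤)-sorted list headed by c is ≠ c
lemma pv_dropWhile_ne (c : Char) (rest : List Char) (h : (c :: rest).Pairwise (· ≤ ·)) :
    ∀ x ∈ rest.dropWhile (· == c), x ≠ c := by
  intro x hx
  cases ht : rest.dropWhile (· == c) with
  | nil => rw [ht] at hx; simp at hx
  | cons d t' =>
    rw [ht] at hx
    have hrest : rest.Pairwise (· ≤ ·) := (List.pairwise_cons.mp h).2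
    have hcle : ∀ y ∈ rest, c ≤ y := (List.pairwise_cons.mp h).1
    have hdrop : (d :: t').Pairwise (· ≤ ·) := ht ▸ hrest.sublist (List.dropWhile_sublist _)
    have hdc : d ≠ c := by
      have := pv_dropWhile_head_false ht
      simpa using this
    have hdmem : d ∈ rest := (List.dropWhile_sublist _).subset (ht ▸ List.mem_cons_self)
    have hcd : c < d := lt_of_le_of_ne (hcle d hdmem) (Ne.symm hdc)
    rcases List.mem_cons.mp hx with rfl | hx'
    · exact hdc
    · have : d ≤ x := (List.pairwise_cons.mp hdrop).1 x hx'
      exact fun hxc => absurd (hxc ▸ this) (not_le.mpr hcd)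

-- count of the head in a sorted list = length of the leading run + 1
lemma pv_count_head (c : Char) (rest : List Char) (h : (c :: rest).Pairwise (· ≤ ·)) :
    (c :: rest).count c = (rest.takeWhile (· == c)).length + 1 := by
  have hsplit : rest.takeWhile (· == c) ++ rest.dropWhile (· == c) = rest :=
    List.takeWhile_append_dropWhile
  have htake : (rest.takeWhile (· == c)).count c = (rest.takeWhile (· == c)).length := by
    rw [List.count_eq_length]
    intro b hb
    have hbc : (b == c) = true := List.mem_takeWhile_imp (p := (· == c)) hb
    exact (beq_iff_eq.mp hbc).symm
  have hdropz : (rest.dropWhile (· == c)).count c = 0 := by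
    rw [List.count_eq_zero]
    intro hmem
    exact pv_dropWhile_ne c rest h c hmem rfl
  have hcr : rest.count c = (rest.takeWhile (· == c)).length := by
    conv_lhs => rw [← hsplit]
    rw [List.count_append, htake, hdropz, Nat.add_zero]
  rw [List.count_cons_self, hcr]

-- counts of non-head chars survive peeling the leading run
lemma pv_count_tail (c d : Char) (rest : List Char) (hd : d ≠ c) :
    (c :: rest).count d = (rest.dropWhile (· == c)).count d := by
  have hsplit : rest.takeWhile (· == c) ++ rest.dropWhile (· == c) = rest :=
    List.takeWhile_append_dropWhile
  have htake : (rest.takeWhile (· == c)).count d = 0 := by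
    rw [List.count_eq_zero]
    intro hmem
    have hbc : (d == c) = true := List.mem_takeWhile_imp (p := (· == c)) hmem
    exact hd (beq_iff_eq.mp hbc)
  have hc : (c :: rest).count d = rest.count d := by
    simp [Ne.symm hd]
  rw [hc]
  conv_lhs => rw [← hsplit]
  rw [List.count_append, htake, Nat.zero_add]

lemma pv_hasRun2_iff (s : List Char) (hs : s.Pairwise (· ≤ ·)) :
    pvHasRun2 s = true ↔ ∃ c, c ∈ s ∧ s.count c = 2 := by
  fun_induction pvHasRun2 s with
  | case1 =>
    simp
  | case2 c rest hlen =>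
    have h2 : (rest.takeWhile (· == c)).length + 1 = 2 := by simpa using hlen
    simp only [true_iff]
    exact ⟨c, List.mem_cons_self, by rw [pv_count_head c rest hs]; exact h2⟩
  | case3 c rest hlen ih =>
    have hrest : rest.Pairwise (· ≤ ·) := (List.pairwise_cons.mp hs).2
    have hp' : (rest.dropWhile (· == c)).Pairwise (· ≤ ·) :=
      hrest.sublist (List.dropWhile_sublist _)
    rw [ih hp']
    constructor
    · rintro ⟨d, hdmem, hcnt⟩
      have hdc : d ≠ c := pv_dropWhile_ne c rest hs d hdmem
      refine ⟨d, ?_, ?_⟩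
      · exact List.mem_cons_of_mem c ((List.dropWhile_sublist _).subset hdmem)
      · rw [pv_count_tail c d rest hdc]; exact hcnt
    · rintro ⟨d, hdmem, hcnt⟩
      by_cases hdc : d = c
      · subst hdc
        rw [pv_count_head d rest hs] at hcnt
        exact absurd (by simpa using hcnt) (by simpa using hlen)
      · have hdrest : d ∈ rest := (List.mem_cons.mp hdmem).resolve_left hdc
        have : d ∈ rest.takeWhile (· == c) ∨ d ∈ rest.dropWhile (· == c) := by
          rw [← List.mem_append, List.takeWhile_append_dropWhile]; exact hdrest
        rcases this with htk | hdr
        · have hbc : (d == c) = true := List.mem_takeWhile_imp (p := (· == c)) htk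
          exact absurd (beq_iff_eq.mp hbc) hdc
        · exact ⟨d, hdr, by rw [← pv_count_tail c d rest hdc]; exact hcnt⟩

-- A's per-element test: 2 ∈ Counter(chars).values ↔ some char occurs exactly twice
lemma pv_counter_iff (l : List Char) :
    (2 : Int) ∈ (PySem.Dict.counter l).values ↔ ∃ c, c ∈ l ∧ l.count c = 2 := by
  have hv : (PySem.Dict.counter l).values
      = (PySem.Set.ofList l).map (fun k => (l.count k : Int)) := by
    have := PySem.Dict.items_counter (xs := l)
    simp only [PySem.Dict.values, this, List.map_map]
    rfl
  rw [hv]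
  simp only [List.mem_map, PySem.Set.mem_ofList]
  constructor
  · rintro ⟨c, hc, hcnt⟩
    exact ⟨c, hc, by exact_mod_cast hcnt⟩
  · rintro ⟨c, hc, hcnt⟩
    exact ⟨c, hc, by exact_mod_cast hcnt⟩

lemma pv_step_eq (acc : List Int) (number : Int) :
    (let number_check := (PySem.Dict.counter (PySem.Int.toChars number)).values
     if (PySem.List.max? number_check (fun x => x)).getD 0 > 2 ∧ ¬ ((2 : Int) ∈ number_check) then acc
     else if (2 : Int) ∈ number_check then acc ++ [number] else acc)
    = (if pvHasRun2 (PySem.List.sorted (PySem.Int.toChars number) (fun c => c) false)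
       then acc ++ [number] else acc) := by
  set l := PySem.Int.toChars number with hl
  have hperm : (PySem.List.sorted l (fun c => c) false).Perm l := PySem.List.sorted_perm _ _ _
  have hpw : (PySem.List.sorted l (fun c => c) false).Pairwise (· ≤ ·) :=
    PySem.List.sorted_pairwise l (fun c => c)
  have hkey : pvHasRun2 (PySem.List.sorted l (fun c => c) false) = true
      ↔ (2 : Int) ∈ (PySem.Dict.counter l).values := by
    rw [pv_hasRun2_iff _ hpw, pv_counter_iff]
    constructor
    · rintro ⟨c, hc, hcnt⟩
      exact ⟨c, hperm.mem_iff.mp hc, by rw [← hperm.count_eq]; exact hcnt⟩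
    · rintro ⟨c, hc, hcnt⟩
      exact ⟨c, hperm.mem_iff.mpr hc, by rw [hperm.count_eq]; exact hcnt⟩
  by_cases h2 : (2 : Int) ∈ (PySem.Dict.counter l).values
  · have hb : pvHasRun2 (PySem.List.sorted l (fun c => c) false) = true := hkey.mpr h2
    simp [h2, hb]
  · have hb : pvHasRun2 (PySem.List.sorted l (fun c => c) false) = false := by
      rw [← Bool.not_eq_true]; exact fun h => h2 (hkey.mp h)
    simp [h2, hb]

-- ===== VERDICT (by name: the statement is the Claim_ definition above) =====
theorem check_candidates_again_spec : Claim_equal_check_candidates_again := by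
  intro candidates _
  unfold Spec_check_candidates_again check_candidates_again check_candidates_again_alt
  congr 1
  funext acc number
  exact pv_step_eq acc number
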